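-- pv_equiv track=rewrite | github.com/BentleyCS/4-01-basics-of-loops-oliviarainin28 | CSP_4_01_Basics_of_Loops.py | oddNumbers
-- ===== SOURCE A (Python) =====
-- def oddNumbers(n:int) ->str:
--     """
--     Print out all odd numbers from 1 to n(inclusive) in a single string seperated by spaces.
--     example oddNumbers(5) -> "1 3 5"
--     example oddNumbers(8) -> "1 3 5 7"
--     example oddNumbers(-8) -> ""
--     """
--     answer = ""
--     for x in range(1,n+1):
--         if x%2 ==1:
--             answer += str(x)
--             if x+2 <= n:
--                 answer += " "
--     return answer
-- ===== SOURCE B (Python) =====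
-- def oddNumbers(n: int) -> str:
--     return " ".join(str(x) for x in range(1, n + 1, 2))
-- ===== Notes on version B (the rewrite author's own statement) =====
-- stated objective: idiomatic
-- what changed: Replaces the 1..n loop with a parity test and manual trailing-separator bookkeeping by iterating over the odd numbers directly with a step-2 range and letting str.join place the separators.
import Mathlib
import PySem

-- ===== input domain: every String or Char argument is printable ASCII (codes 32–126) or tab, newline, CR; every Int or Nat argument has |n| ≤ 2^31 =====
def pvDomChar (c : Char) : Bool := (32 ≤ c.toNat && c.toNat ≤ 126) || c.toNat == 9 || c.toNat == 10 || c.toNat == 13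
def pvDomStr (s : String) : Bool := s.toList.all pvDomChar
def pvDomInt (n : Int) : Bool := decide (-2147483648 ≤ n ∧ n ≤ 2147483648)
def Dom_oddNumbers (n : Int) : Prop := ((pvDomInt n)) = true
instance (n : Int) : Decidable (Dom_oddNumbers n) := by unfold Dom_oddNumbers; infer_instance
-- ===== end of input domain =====

-- B iterates over the odd numbers directly with a step-2 range and lets join place the
-- separators, instead of A's 1..n loop with a parity test and a trailing-separator branch.

-- ===== PORT A =====
def oddNumbers (n : Int) : String :=
  (PySem.List.pyRange 1 (n + 1) 1).foldl
    (fun answer x =>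
      if PySem.Int.mod x 2 = 1 then
        let answer := answer ++ PySem.Int.toStr x
        if x + 2 ≤ n then answer ++ " " else answer
      else answer) ""

-- ===== PORT B =====
def oddNumbers_alt (n : Int) : String :=
  PySem.Str.join " " ((PySem.List.pyRange 1 (n + 1) 2).map PySem.Int.toStr)

-- ===== PRECONDITION & SPEC =====
def Spec_oddNumbers (n : Int) (out : String) : Prop := out = oddNumbers_alt n
instance (n : Int) (out : String) : Decidable (Spec_oddNumbers n out) := by unfold Spec_oddNumbers; infer_instance

-- ===== CLAIM (what is proved, stated in full; the proofs are below) =====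
def Claim_equal_oddNumbers : Prop := ∀ (n : Int), Dom_oddNumbers n → Spec_oddNumbers n (oddNumbers n)

-- ===== LEMMAS AND PROOFS =====

-- the piece A's loop body appends at x (empty for even x)
def pvPiece (n x : Int) : List Char :=
  if PySem.Int.mod x 2 = 1 then
    PySem.Int.toChars x ++ (if x + 2 ≤ n then [' '] else [])
  else []

-- A's String fold, seen on the List Char side
lemma pvFoldl_toList (n : Int) (l : List Int) (init : String) :
    ((l.foldl
      (fun answer x =>
        if PySem.Int.mod x 2 = 1 then
          let answer := answer ++ PySem.Int.toStr x
          if x + 2 ≤ n then answer ++ " " else answer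
        else answer) init).toList)
    = l.foldl (fun acc x => acc ++ pvPiece n x) init.toList := by
  induction l generalizing init with
  | nil => rfl
  | cons x xs ih =>
    simp only [List.foldl_cons]
    rw [ih]
    congr 1
    simp only [pvPiece]
    split_ifs <;>
      simp [String.toList_append, PySem.Int.toList_toStr]

-- step-2 range: nil and cons forms
lemma pvRange_two_nil (a b : Int) (h : b ≤ a) : PySem.List.pyRange a b 2 = [] := by
  rw [PySem.List.pyRange_of_pos a b (by norm_num)]
  simp [show ¬ a < b by omega]

lemma pvRange_two_cons (a b : Int) (h : a < b) :
    PySem.List.pyRange a b 2 = a :: PySem.List.pyRange (a + 2) b 2 := by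
  rw [PySem.List.pyRange_of_pos a b (by norm_num),
      PySem.List.pyRange_of_pos (a + 2) b (by norm_num)]
  by_cases h2 : a + 2 < b
  · have key : ((b - a + 2 - 1) / 2).toNat = ((b - (a + 2) + 2 - 1) / 2).toNat + 1 := by
      omega
    rw [if_pos h, if_pos h2, key, List.range_succ_eq_map]
    simp only [List.map_cons, List.map_map]
    refine List.cons_eq_cons.mpr ⟨by push_cast; ring, ?_⟩
    apply List.map_congr_left
    intro k _
    simp only [Function.comp_apply, Nat.succ_eq_add_one]
    push_cast
    ring
  · have key : ((b - a + 2 - 1) / 2).toNat = 1 := by omega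
    rw [if_pos h, if_neg h2, key]
    simp

-- evaluating pvPiece
lemma pvPiece_odd_sep {n a : Int} (h1 : PySem.Int.mod a 2 = 1) (h2 : a + 2 ≤ n) :
    pvPiece n a = PySem.Int.toChars a ++ [' '] := by
  simp only [pvPiece]; rw [if_pos h1, if_pos h2]

lemma pvPiece_odd_last {n a : Int} (h1 : PySem.Int.mod a 2 = 1) (h2 : ¬ a + 2 ≤ n) :
    pvPiece n a = PySem.Int.toChars a := by
  simp only [pvPiece]; rw [if_pos h1, if_neg h2]; simp

lemma pvPiece_even {n a : Int} (h : PySem.Int.mod a 2 ≠ 1) : pvPiece n a = [] := by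
  simp only [pvPiece]; rw [if_neg h]

-- the core equation: A's concatenation over range(a, n+1) (a odd) is the join over range(a, n+1, 2)
lemma pvFlat_eq_join (n : Int) :
    ∀ (k : Nat) (a : Int), (n + 1 - a).toNat = k → a % 2 = 1 →
      (PySem.List.pyRange a (n + 1) 1).flatMap (pvPiece n)
        = PySem.Chars.join [' '] ((PySem.List.pyRange a (n + 1) 2).map PySem.Int.toChars) := by
  intro k
  induction k using Nat.strong_induction_on with
  | _ k ih =>
    intro a hk ha
    by_cases hle : n + 1 ≤ a
    · rw [PySem.List.pyRange_one_eq_nil hle, pvRange_two_nil _ _ hle]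
      simp [PySem.Chars.join_nil]
    · have haltn : a < n + 1 := by omega
      have hodd : PySem.Int.mod a 2 = 1 := by
        rw [PySem.Int.mod_eq_emod_of_pos (by norm_num)]; exact ha
      rw [PySem.List.pyRange_one_cons haltn, pvRange_two_cons _ _ haltn]
      by_cases h2 : a + 2 ≤ n
      · -- a gets a separator; a+1 (even) contributes nothing; recurse at a+2
        have hstep1 : PySem.List.pyRange (a + 1) (n + 1) 1
            = (a + 1) :: PySem.List.pyRange (a + 2) (n + 1) 1 := by
          rw [PySem.List.pyRange_one_cons (by omega)]
          norm_num [add_assoc]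
        have heven : PySem.Int.mod (a + 1) 2 ≠ 1 := by
          rw [PySem.Int.mod_eq_emod_of_pos (by norm_num)]; omega
        have hrec := ih ((n + 1 - (a + 2)).toNat) (by omega) (a + 2) rfl (by omega)
        have htl : PySem.List.pyRange (a + 2) (n + 1) 2
            = (a + 2) :: PySem.List.pyRange (a + 2 + 2) (n + 1) 2 :=
          pvRange_two_cons _ _ (by omega)
        rw [List.flatMap_cons, hstep1, List.flatMap_cons, hrec]
        conv_rhs => rw [List.map_cons, htl, List.map_cons, PySem.Chars.join_cons_cons,
          ← List.map_cons, ← htl]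
        rw [pvPiece_odd_sep hodd h2, pvPiece_even heven]
        simp
      · -- a is the last odd number: no separator, and nothing odd remains
        have hpa : pvPiece n a = PySem.Int.toChars a := pvPiece_odd_last hodd h2
        have htail2 : PySem.List.pyRange (a + 2) (n + 1) 2 = [] :=
          pvRange_two_nil _ _ (by omega)
        have htail1 : (PySem.List.pyRange (a + 1) (n + 1) 1).flatMap (pvPiece n) = [] := by
          by_cases hna : n + 1 ≤ a + 1
          · rw [PySem.List.pyRange_one_eq_nil hna]; rfl
          · have : n + 1 = a + 1 + 1 := by omega
            rw [this, PySem.List.pyRange_one_singleton]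
            have heven : PySem.Int.mod (a + 1) 2 ≠ 1 := by
              rw [PySem.Int.mod_eq_emod_of_pos (by norm_num)]; omega
            simp [pvPiece_even heven]
        rw [List.flatMap_cons, htail1, htail2, hpa]
        simp [PySem.Chars.join_singleton]

-- ===== VERDICT (by name: the statement is the Claim_ definition above) =====
theorem oddNumbers_spec : Claim_equal_oddNumbers := by
  intro n _
  show oddNumbers n = oddNumbers_alt n
  apply String.toList_inj.mp
  rw [oddNumbers, oddNumbers_alt, pvFoldl_toList,
      PySem.List.foldl_append_eq_flatMap, PySem.Str.toList_join]
  rw [pvFlat_eq_join n ((n + 1 - 1).toNat) 1 rfl (by norm_num)]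
  have h0 : ("" : String).toList = [] := rfl
  have hsp : (" " : String).toList = [' '] := rfl
  rw [h0, hsp, List.nil_append]
  congr 1
  rw [List.map_map]
  apply List.map_congr_left
  intro x _
  exact (PySem.Int.toList_toStr x).symm
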